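-- pv_equiv track=rewrite | github.com/bredcode/problem-solving | zb/자신감점수/Solution.py | solution
-- ===== SOURCE A (Python) =====
-- def solution(N, _warriors):
--     answer = 0
--
--     # i번째 워리어를 제거 예정
--     for i in range(N):
--         # 일단 모든 워리어 추가
--         warriors = _warriors[:]
--
--         # i번째 워리어 제거
--         warriors.pop(i)
--
--         # 자신감 계산
--         count = confidence(N - 1, warriors)
--         answer = max(answer, count)
--
--     return answer
--
-- def confidence(M, arr):
--     cnt = 0  # 자신감 점수
--     for i in range(M):
--         left = i - 1  # 왼쪽 전사
--         if left == -1: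
--             left = M - 1
--         right = i + 1  # 오른쪽 전사
--         if right == M:
--             right = 0
--         # 자신감이 있는 상태인 전사인 경우
--         if arr[left] < arr[i] and arr[i] > arr[right]:
--             cnt += 1  # 카운트
--
--     return cnt
-- ===== SOURCE B (Python) =====
-- def solution(N, _warriors):
--     if N < 3:
--         return 0
--     a = _warriors[:N]
--     base = sum(tri(a, N, j - 1, j, j + 1) for j in range(N))
--     best = 0
--     for i in range(N):
--         cand = (base
--                 - tri(a, N, i - 2, i - 1, i)
--                 - tri(a, N, i - 1, i, i + 1)
--                 - tri(a, N, i, i + 1, i + 2)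
--                 + tri(a, N, i - 1, i + 1, i + 2)
--                 + tri(a, N, i - 2, i - 1, i + 1))
--         best = max(best, cand)
--     return best
--
-- def tri(a, N, l, m, r):
--     return 1 if a[l % N] < a[m % N] and a[m % N] > a[r % N] else 0
-- ===== Notes on version B (the rewrite author's own statement) =====
-- stated objective: faster
-- what changed: B never rebuilds or rescans a candidate list: it precomputes the circular peak count of the full array once and, for each removal, adjusts it in O(1) by the three peak positions destroyed and the two junction triples created, turning A's remove-and-recount O(N^2) into a single-pass O(N).
import Mathlib
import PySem

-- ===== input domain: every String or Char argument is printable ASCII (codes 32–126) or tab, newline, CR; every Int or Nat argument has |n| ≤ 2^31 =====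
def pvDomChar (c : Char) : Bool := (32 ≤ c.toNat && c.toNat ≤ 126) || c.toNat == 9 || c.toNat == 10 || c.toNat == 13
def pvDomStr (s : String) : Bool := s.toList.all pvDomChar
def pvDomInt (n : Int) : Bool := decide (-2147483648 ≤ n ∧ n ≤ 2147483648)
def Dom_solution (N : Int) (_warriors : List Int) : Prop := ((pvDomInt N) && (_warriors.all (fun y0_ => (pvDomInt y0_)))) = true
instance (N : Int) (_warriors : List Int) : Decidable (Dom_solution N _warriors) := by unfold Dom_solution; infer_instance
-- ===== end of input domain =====

-- B replaces A's remove-each-and-recount (O(N^2)) by one precomputed circular peak count that is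
-- adjusted in O(1) per removal (peaks destroyed at i-1,i,i+1; junction triples created at i-1,i+1):
-- O(N) total (objective: faster, asymptotic; confirmed).

-- ===== PORT A =====
def confidence (M : Int) (arr : List Int) : Int :=
  (PySem.List.pyRange 0 M 1).foldl (fun cnt i =>
    let left := i - 1
    let left := if left = -1 then M - 1 else left
    let right := i + 1
    let right := if right = M then 0 else right
    if PySem.List.pyGetD arr left 0 < PySem.List.pyGetD arr i 0 ∧
       PySem.List.pyGetD arr i 0 > PySem.List.pyGetD arr right 0 then cnt + 1 else cnt) 0

def solution (N : Int) (_warriors : List Int) : Int :=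
  (PySem.List.pyRange 0 N 1).foldl (fun answer i =>
    let warriors := PySem.List.slice _warriors none none
    match PySem.List.pop? warriors i with
    | none => answer   -- Python raises IndexError here; excluded by Pre_solution
    | some (_, warriors') => max answer (confidence (N - 1) warriors')) 0

-- ===== PORT B =====
def tri (a : List Int) (N l m r : Int) : Int :=
  if PySem.List.pyGetD a (PySem.Int.mod l N) 0 < PySem.List.pyGetD a (PySem.Int.mod m N) 0 ∧
     PySem.List.pyGetD a (PySem.Int.mod m N) 0 > PySem.List.pyGetD a (PySem.Int.mod r N) 0 then 1 else 0

def solution_alt (N : Int) (_warriors : List Int) : Int :=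
  if N < 3 then 0
  else
    let a := PySem.List.slice _warriors none (some N)
    let base := (PySem.List.pyRange 0 N 1).foldl (fun s j => s + tri a N (j - 1) j (j + 1)) 0
    (PySem.List.pyRange 0 N 1).foldl (fun best i =>
      max best (base - tri a N (i - 2) (i - 1) i - tri a N (i - 1) i (i + 1)
        - tri a N i (i + 1) (i + 2)
        + tri a N (i - 1) (i + 1) (i + 2) + tri a N (i - 2) (i - 1) (i + 1))) 0

-- ===== PRECONDITION & SPEC =====
-- Pre_ excludes exactly the inputs where A raises IndexError: N larger than the list length.
def Pre_solution (N : Int) (_warriors : List Int) : Prop := N ≤ (_warriors.length : Int)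
instance (N : Int) (_warriors : List Int) : Decidable (Pre_solution N _warriors) := by
  unfold Pre_solution; infer_instance

def pvWitness_solution : Int × List Int := (3, [1, 3, 2])

def Spec_solution (N : Int) (_warriors : List Int) (out : Int) : Prop := out = solution_alt N _warriors
instance (N : Int) (_warriors : List Int) (out : Int) : Decidable (Spec_solution N _warriors out) := by
  unfold Spec_solution; infer_instance

-- ===== CLAIM (what is proved, stated in full; the proofs are below) =====
def Claim_equal_solution : Prop := ∀ (N : Int) (_warriors : List Int), Dom_solution N _warriors → Pre_solution N _warriors → Spec_solution N _warriors (solution N _warriors)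

-- ===== LEMMAS AND PROOFS =====

-- the circular-peak condition at position j of a list read as a length-n circle
abbrev peakAt (t : List Int) (n j : Nat) : Prop :=
  t.getD (if j = 0 then n - 1 else j - 1) 0 < t.getD j 0 ∧
  t.getD j 0 > t.getD (if j + 1 = n then 0 else j + 1) 0

-- 0/1 indicator of a strict peak of a at positions x < y > z
def ind (a : List Int) (x y z : Nat) : Int :=
  if a.getD x 0 < a.getD y 0 ∧ a.getD y 0 > a.getD z 0 then 1 else 0

-- circular neighbours of v in a circle of size n
def m1f (n v : Nat) : Nat := if v = 0 then n - 1 else v - 1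
def p1f (n v : Nat) : Nat := if v + 1 = n then 0 else v + 1
def m2f (n v : Nat) : Nat := if 2 ≤ v then v - 2 else v + n - 2
def p2f (n v : Nat) : Nat := if n ≤ v + 2 then v + 2 - n else v + 2

-- peak indicator of the full circle at position v
def pkf (a : List Int) (n v : Nat) : Int := ind a (m1f n v) v (p1f n v)

-- position in the full circle of the j-th element after erasing index k
def Efun (k j : Nat) : Nat := if j < k then j else j + 1

-- peak indicator, in the circle with k erased, of the element of original position v
def Gfun (a : List Int) (n k v : Nat) : Int :=
  if v = p1f n k then ind a (m1f n k) (p1f n k) (p2f n k)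
  else if v = m1f n k then ind a (m2f n k) (m1f n k) (p1f n k)
  else pkf a n v

def S (n : Nat) (f : Nat → Int) : Int := ∑ j ∈ Finset.range n, f j

lemma getD_take_eq (l : List Int) (n m : Nat) (h : m < n) :
    (l.take n).getD m 0 = l.getD m 0 := by
  simp [List.getD_eq_getElem?_getD, h]

lemma pyGetD_take (arr : List Int) (n m : Nat) (h : m < n) :
    PySem.List.pyGetD arr (m : Int) 0 = (arr.take n).getD m 0 := by
  rw [PySem.List.pyGetD_natCast, getD_take_eq arr n m h]

lemma countP_range_sum (p : Nat → Bool) (m : Nat) :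
    (((List.range m).countP p : Nat) : Int) = ∑ j ∈ Finset.range m, (if p j then (1:Int) else 0) := by
  induction m with
  | zero => simp
  | succ m ih =>
    rw [List.range_succ, List.countP_append, Finset.sum_range_succ, ← ih]
    by_cases h : p m <;> simp [h]

-- A's index loop with wraparound branches counts the circular peaks
lemma confidence_eq_countP (n : Nat) (arr : List Int) (_h : n ≤ arr.length) :
    confidence (n : Int) arr
      = ((List.range n).countP (fun j => decide (peakAt (arr.take n) n j)) : Int) := by
  unfold confidence
  rw [PySem.List.pyRange_one, show ((n : Int) - 0).toNat = n by omega, List.foldl_map]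
  rw [PySem.List.foldl_ite_add_one
    (fun k : Nat => PySem.List.pyGetD arr (if (0 + (k : Int)) - 1 = -1 then (n : Int) - 1 else (0 + (k : Int)) - 1) 0 < PySem.List.pyGetD arr (0 + (k : Int)) 0 ∧
       PySem.List.pyGetD arr (0 + (k : Int)) 0 > PySem.List.pyGetD arr (if (0 + (k : Int)) + 1 = (n : Int) then 0 else (0 + (k : Int)) + 1) 0)]
  rw [zero_add]
  congr 1
  apply List.countP_congr
  intro j hj
  simp only [List.mem_range] at hj
  simp only [zero_add]
  have e2 : PySem.List.pyGetD arr (j : Int) 0 = (arr.take n).getD j 0 := pyGetD_take arr n j hj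
  have e1 : PySem.List.pyGetD arr (if (j : Int) - 1 = -1 then (n : Int) - 1 else (j : Int) - 1) 0
      = (arr.take n).getD (if j = 0 then n - 1 else j - 1) 0 := by
    by_cases hj0 : j = 0
    · subst hj0
      rw [if_pos (by omega), if_pos rfl, show (n : Int) - 1 = ((n - 1 : Nat) : Int) by omega]
      exact pyGetD_take arr n (n - 1) (by omega)
    · rw [if_neg (by omega), if_neg hj0, show (j : Int) - 1 = ((j - 1 : Nat) : Int) by omega]
      exact pyGetD_take arr n (j - 1) (by omega)
  have e3 : PySem.List.pyGetD arr (if (j : Int) + 1 = (n : Int) then 0 else (j : Int) + 1) 0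
      = (arr.take n).getD (if j + 1 = n then 0 else j + 1) 0 := by
    by_cases hj1 : j + 1 = n
    · rw [if_pos (by omega), if_pos hj1, show (0 : Int) = ((0 : Nat) : Int) by omega]
      exact pyGetD_take arr n 0 (by omega)
    · rw [if_neg (by omega), if_neg hj1, show (j : Int) + 1 = ((j + 1 : Nat) : Int) by omega]
      exact pyGetD_take arr n (j + 1) (by omega)
  simp only [peakAt]
  rw [e1, e2, e3]

lemma conf_eq_S (n : Nat) (arr : List Int) (h : n ≤ arr.length) :
    confidence (n : Int) arr = S n (pkf (arr.take n) n) := by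
  rw [confidence_eq_countP n arr h, countP_range_sum]
  unfold S
  apply Finset.sum_congr rfl
  intro j _
  simp [pkf, ind, m1f, p1f, peakAt]

-- taking then erasing commute
lemma take_eraseIdx (w : List Int) (n k : Nat) (hk : k < n) (hn : n ≤ w.length) :
    (w.eraseIdx k).take (n - 1) = (w.take n).eraseIdx k := by
  rw [List.eraseIdx_eq_take_drop_succ, List.eraseIdx_eq_take_drop_succ, List.take_append,
      List.take_take, List.take_take, List.drop_take, List.length_take,
      Nat.min_eq_right (show k ≤ n - 1 by omega), Nat.min_eq_left (show k ≤ n by omega),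
      Nat.min_eq_left (show k ≤ w.length by omega)]
  congr 2
  omega

lemma getD_eraseIdx (a : List Int) (k m : Nat) (hk : k < a.length) (hm : m < a.length - 1) :
    (a.eraseIdx k).getD m 0 = a.getD (Efun k m) 0 := by
  have hlen : (a.eraseIdx k).length = a.length - 1 := by
    rw [List.length_eraseIdx]; simp [hk]
  unfold Efun
  by_cases h : m < k
  · rw [if_pos h, List.getD_eq_getElem _ _ (by omega), List.getD_eq_getElem _ _ (by omega),
        List.getElem_eraseIdx_of_lt (by omega) h]
  · rw [if_neg h, List.getD_eq_getElem _ _ (by omega), List.getD_eq_getElem _ _ (by omega),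
        List.getElem_eraseIdx_of_ge (by omega) (by omega)]

-- pointwise: the peak test after erasing k, read back in original positions
lemma pk_erase_eq_G (a : List Int) (n k j : Nat) (ha : a.length = n) (h3 : 3 ≤ n)
    (hk : k < n) (hj : j < n - 1) :
    pkf (a.eraseIdx k) (n - 1) j = Gfun a n k (Efun k j) := by
  have hind : ∀ x y z, x < n - 1 → y < n - 1 → z < n - 1 →
      ind (a.eraseIdx k) x y z = ind a (Efun k x) (Efun k y) (Efun k z) := by
    intro x y z hx hy hz
    unfold ind
    rw [getD_eraseIdx a k x (by omega) (by omega), getD_eraseIdx a k y (by omega) (by omega),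
        getD_eraseIdx a k z (by omega) (by omega)]
  rw [pkf, hind _ _ _ (by unfold m1f; split_ifs <;> first | omega | exact (‹False›).elim) hj
        (by unfold p1f; split_ifs <;> first | omega | exact (‹False›).elim)]
  have hL : Efun k (m1f (n - 1) j)
      = (if Efun k j = p1f n k then m1f n k
         else if Efun k j = m1f n k then m2f n k
         else m1f n (Efun k j)) := by
    simp only [Efun, m1f, m2f, p1f]
    split_ifs <;> first | omega | exact (‹False›).elim
  have hR : Efun k (p1f (n - 1) j)
      = (if Efun k j = p1f n k then p2f n k
         else if Efun k j = m1f n k then p1f n k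
         else p1f n (Efun k j)) := by
    simp only [Efun, m1f, m2f, p1f, p2f]
    split_ifs <;> first | omega | exact (‹False›).elim
  rw [hL, hR, Gfun]
  split_ifs with h1 h2
  · rw [h1]
  · rw [h2]
  · rw [pkf]

-- re-indexing the sum over the erased circle
lemma sum_E (f : Nat → Int) (n k : Nat) (hk : k < n) :
    (∑ j ∈ Finset.range (n - 1), f (Efun k j)) = (∑ v ∈ Finset.range n, f v) - f k := by
  rw [Finset.range_eq_Ico,
      ← Finset.sum_Ico_consecutive (fun j => f (Efun k j)) (Nat.zero_le k) (show k ≤ n - 1 by omega),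
      ← Finset.sum_Ico_consecutive f (Nat.zero_le k) (show k ≤ n by omega),
      Finset.sum_eq_sum_Ico_succ_bot (show k < n by omega) f]
  have h1 : (∑ j ∈ Finset.Ico 0 k, f (Efun k j)) = ∑ j ∈ Finset.Ico 0 k, f j := by
    apply Finset.sum_congr rfl
    intro j hj
    rw [Finset.mem_Ico] at hj
    unfold Efun
    rw [if_pos hj.2]
  have h2 : (∑ j ∈ Finset.Ico k (n - 1), f (Efun k j)) = ∑ v ∈ Finset.Ico (k + 1) n, f v := by
    have h2a : (∑ j ∈ Finset.Ico k (n - 1), f (Efun k j)) = ∑ j ∈ Finset.Ico k (n - 1), f (j + 1) := by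
      apply Finset.sum_congr rfl
      intro j hj
      rw [Finset.mem_Ico] at hj
      unfold Efun
      rw [if_neg (by omega)]
    rw [h2a, Finset.sum_Ico_add' f k (n - 1) 1, show n - 1 + 1 = n by omega]
  rw [h1, h2]
  ring

-- the adjusted-count identity
lemma sum_G (a : List Int) (n k : Nat) (h3 : 3 ≤ n) (hk : k < n) :
    (∑ v ∈ Finset.range n, Gfun a n k v)
      = (∑ v ∈ Finset.range n, pkf a n v) - pkf a n (p1f n k) - pkf a n (m1f n k)
        + ind a (m1f n k) (p1f n k) (p2f n k) + ind a (m2f n k) (m1f n k) (p1f n k) := by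
  have hne : p1f n k ≠ m1f n k := by unfold p1f m1f; split_ifs <;> first | omega | exact (‹False›).elim
  have point : ∀ v, Gfun a n k v = pkf a n v
      + (if v = p1f n k then ind a (m1f n k) (p1f n k) (p2f n k) - pkf a n (p1f n k) else 0)
      + (if v = m1f n k then ind a (m2f n k) (m1f n k) (p1f n k) - pkf a n (m1f n k) else 0) := by
    intro v
    by_cases hA : v = p1f n k
    · subst hA
      unfold Gfun
      rw [if_pos rfl, if_pos rfl, if_neg hne]
      ring
    · by_cases hB : v = m1f n k
      · subst hB
        have hA' : m1f n k ≠ p1f n k := fun h => hne h.symm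
        unfold Gfun
        simp only [hA', if_false, if_true, if_neg hA', if_pos rfl]
        ring
      · unfold Gfun
        simp only [if_neg hA, if_neg hB]
        ring
  rw [Finset.sum_congr rfl (fun v _ => point v), Finset.sum_add_distrib, Finset.sum_add_distrib,
      Finset.sum_ite_eq' (Finset.range n) (p1f n k) (fun _ => ind a (m1f n k) (p1f n k) (p2f n k) - pkf a n (p1f n k)),
      Finset.sum_ite_eq' (Finset.range n) (m1f n k) (fun _ => ind a (m2f n k) (m1f n k) (p1f n k) - pkf a n (m1f n k))]
  have hp1 : p1f n k ∈ Finset.range n := by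
    rw [Finset.mem_range]; unfold p1f; split_ifs <;> first | omega | exact (‹False›).elim
  have hm1 : m1f n k ∈ Finset.range n := by
    rw [Finset.mem_range]; unfold m1f; split_ifs <;> first | omega | exact (‹False›).elim
  rw [if_pos hp1, if_pos hm1]
  ring

lemma G_self (a : List Int) (n k : Nat) (h3 : 3 ≤ n) (hk : k < n) :
    Gfun a n k k = pkf a n k := by
  unfold Gfun m1f p1f
  split_ifs <;> first | rfl | omega

-- ===== bridging B's tri terms to ind =====

lemma emod_lo (x N : Int) (h1 : -N ≤ x) (h2 : x < 0) : x % N = x + N := by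
  have h0 : 0 < N := by omega
  have h := Int.add_mul_emod_self_left x N 1
  rw [show x + N * 1 = x + N by ring] at h
  rw [← h, Int.emod_eq_of_lt (by omega) (by omega)]

lemma emod_hi (x N : Int) (h1 : N ≤ x) (h2 : x < 2 * N) : x % N = x - N := by
  have h0 : 0 < N := by omega
  have h := Int.add_mul_emod_self_left (x - N) N 1
  rw [show x = x - N + N * 1 by ring]
  rw [h, Int.emod_eq_of_lt (by omega) (by omega)]
  ring

lemma tri_eq_ind (a : List Int) (N l m r : Int) (hN : 0 < N) (ha : (a.length : Int) = N) :
    tri a N l m r = ind a (l % N).toNat (m % N).toNat (r % N).toNat := by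
  have key : ∀ x : Int, PySem.List.pyGetD a (PySem.Int.mod x N) 0 = a.getD (x % N).toNat 0 := by
    intro x
    rw [PySem.Int.mod_eq_emod_of_pos hN]
    have h0 : 0 ≤ x % N := Int.emod_nonneg x (by omega)
    have h1 : x % N < N := Int.emod_lt_of_pos x hN
    rw [PySem.List.pyGetD_eq_getElem a 0 h0 (by omega), List.getD_eq_getElem _ _ (by omega)]
  unfold tri ind
  rw [key, key, key]


lemma list_sum_range (f : Nat → Int) (m : Nat) :
    ((List.range m).map f).sum = ∑ j ∈ Finset.range m, f j := by
  induction m with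
  | zero => simp
  | succ m ih => rw [List.range_succ, List.map_append, List.sum_append, Finset.sum_range_succ, ih]; simp

lemma idx0 (n k : Nat) (h3 : 3 ≤ n) (hk : k < n) :
    (((k : Int)) % ((n : Nat) : Int)).toNat = k := by
  rw [Int.emod_eq_of_lt (by omega) (by omega)]; omega

lemma idxp1 (n k : Nat) (h3 : 3 ≤ n) (hk : k < n) :
    (((k : Int) + 1) % ((n : Nat) : Int)).toNat = p1f n k := by
  unfold p1f
  split_ifs with h
  · rw [show (k : Int) + 1 = (n : Int) by omega, Int.emod_self]; rfl
  · rw [Int.emod_eq_of_lt (by omega) (by omega)]; omega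

lemma idxm1 (n k : Nat) (h3 : 3 ≤ n) (hk : k < n) :
    (((k : Int) - 1) % ((n : Nat) : Int)).toNat = m1f n k := by
  unfold m1f
  split_ifs with h
  · rw [emod_lo _ _ (by omega) (by omega)]; omega
  · rw [Int.emod_eq_of_lt (by omega) (by omega)]; omega

lemma idxp2 (n k : Nat) (h3 : 3 ≤ n) (hk : k < n) :
    (((k : Int) + 2) % ((n : Nat) : Int)).toNat = p2f n k := by
  unfold p2f
  split_ifs with h
  · rw [emod_hi _ _ (by omega) (by omega)]; omega
  · rw [Int.emod_eq_of_lt (by omega) (by omega)]; omega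

lemma idxm2 (n k : Nat) (h3 : 3 ≤ n) (hk : k < n) :
    (((k : Int) - 2) % ((n : Nat) : Int)).toNat = m2f n k := by
  unfold m2f
  split_ifs with h
  · rw [Int.emod_eq_of_lt (by omega) (by omega)]; omega
  · rw [emod_lo _ _ (by omega) (by omega)]; omega

lemma pkf_p1 (a : List Int) (n k : Nat) (h3 : 3 ≤ n) (hk : k < n) :
    pkf a n (p1f n k) = ind a k (p1f n k) (p2f n k) := by
  unfold pkf
  rw [show m1f n (p1f n k) = k by unfold m1f p1f; split_ifs <;> first | omega | exact (‹False›).elim,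
      show p1f n (p1f n k) = p2f n k by unfold p1f p2f; split_ifs <;> first | omega | exact (‹False›).elim]

lemma pkf_m1 (a : List Int) (n k : Nat) (h3 : 3 ≤ n) (hk : k < n) :
    pkf a n (m1f n k) = ind a (m2f n k) (m1f n k) k := by
  unfold pkf
  rw [show m1f n (m1f n k) = m2f n k by unfold m1f m2f; split_ifs <;> first | omega | exact (‹False›).elim,
      show p1f n (m1f n k) = k by unfold p1f m1f; split_ifs <;> first | omega | exact (‹False›).elim]

lemma pkf_k (a : List Int) (n k : Nat) (h3 : 3 ≤ n) (hk : k < n) :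
    pkf a n k = ind a (m1f n k) k (p1f n k) := rfl

-- the per-removal scalar identity: A's recount equals B's O(1)-adjusted count
lemma core (w : List Int) (N : Int) (k : Nat) (h3 : 3 ≤ N) (hw : N ≤ (w.length : Int))
    (hk : k < N.toNat) :
    confidence (N - 1) (w.eraseIdx k)
      = S N.toNat (pkf (w.take N.toNat) N.toNat)
        - tri (w.take N.toNat) N ((k : Int) - 2) ((k : Int) - 1) (k : Int)
        - tri (w.take N.toNat) N ((k : Int) - 1) (k : Int) ((k : Int) + 1)
        - tri (w.take N.toNat) N (k : Int) ((k : Int) + 1) ((k : Int) + 2)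
        + tri (w.take N.toNat) N ((k : Int) - 1) ((k : Int) + 1) ((k : Int) + 2)
        + tri (w.take N.toNat) N ((k : Int) - 2) ((k : Int) - 1) ((k : Int) + 1) := by
  have hn3 : 3 ≤ N.toNat := by omega
  have hNn : N = (N.toNat : Int) := by omega
  set n := N.toNat with hn
  have hnw : n ≤ w.length := by omega
  have ha : (w.take n).length = n := by rw [List.length_take]; omega
  set a := w.take n with haw
  have herl : (w.eraseIdx k).length = w.length - 1 := by
    rw [List.length_eraseIdx, if_pos (by omega)]
  rw [show N - 1 = ((n - 1 : Nat) : Int) by omega,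
      conf_eq_S (n - 1) (w.eraseIdx k) (by omega),
      take_eraseIdx w n k hk hnw, ← haw]
  unfold S
  rw [Finset.sum_congr rfl (fun j hj =>
        pk_erase_eq_G a n k j ha hn3 hk (by simpa using Finset.mem_range.mp hj)),
      sum_E (Gfun a n k) n k hk, sum_G a n k hn3 hk, G_self a n k hn3 hk]
  rw [hNn, tri_eq_ind a _ _ _ _ (by omega) (by omega), tri_eq_ind a _ _ _ _ (by omega) (by omega),
      tri_eq_ind a _ _ _ _ (by omega) (by omega), tri_eq_ind a _ _ _ _ (by omega) (by omega),
      tri_eq_ind a _ _ _ _ (by omega) (by omega)]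
  rw [idx0 n k hn3 hk, idxp1 n k hn3 hk, idxm1 n k hn3 hk, idxp2 n k hn3 hk, idxm2 n k hn3 hk]
  rw [pkf_p1 a n k hn3 hk, pkf_m1 a n k hn3 hk, pkf_k a n k hn3 hk]
  ring

-- B's precomputed base is the full circular peak count
lemma base_eq (w : List Int) (N : Int) (h3 : 3 ≤ N) (hw : N ≤ (w.length : Int)) :
    (PySem.List.pyRange 0 N 1).foldl
        (fun s j => s + tri (w.take N.toNat) N (j - 1) j (j + 1)) 0
      = S N.toNat (pkf (w.take N.toNat) N.toNat) := by
  have hn3 : 3 ≤ N.toNat := by omega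
  have hNn : N = (N.toNat : Int) := by omega
  set n := N.toNat with hn
  have ha : (w.take n).length = n := by rw [List.length_take]; omega
  set a := w.take n with haw
  rw [PySem.List.foldl_add, zero_add, PySem.List.pyRange_one, List.map_map,
      show (N - 0).toNat = n by omega, list_sum_range]
  unfold S
  apply Finset.sum_congr rfl
  intro j hj
  rw [Finset.mem_range] at hj
  show tri a N (0 + (j : Int) - 1) (0 + (j : Int)) (0 + (j : Int) + 1) = pkf a n j
  rw [zero_add, hNn, tri_eq_ind a _ _ _ _ (by omega) (by omega),
      idx0 n j hn3 hj, idxp1 n j hn3 hj, idxm1 n j hn3 hj]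
  rfl

lemma foldl_max_zero (l : List Int) : l.foldl (fun (a : Int) (_ : Int) => max a 0) 0 = 0 := by
  induction l with
  | nil => rfl
  | cons x l ih => simpa using ih

lemma conf_small (M : Int) (arr : List Int) (h : M ≤ 1) : confidence M arr = 0 := by
  unfold confidence
  rcases lt_or_ge M 1 with h1 | h1
  · rw [PySem.List.pyRange_one_eq_nil (by omega)]
    rfl
  · have hM : M = 1 := le_antisymm h h1
    subst hM
    have hr : PySem.List.pyRange 0 1 1 = [0] := by
      have := PySem.List.pyRange_one_singleton 0
      simpa using this
    rw [hr]
    simp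

-- ===== VERDICT (by name: the statement is the Claim_ definition above) =====
theorem solution_spec : Claim_equal_solution := by
  intro N w _ hPre
  unfold Pre_solution at hPre
  show solution N w = solution_alt N w
  unfold solution solution_alt
  by_cases h3 : N < 3
  · rw [if_pos h3]
    refine Eq.trans ?_ (foldl_max_zero (PySem.List.pyRange 0 N 1))
    apply PySem.List.foldl_congr_mem
    intro acc i hi
    rw [PySem.List.mem_pyRange_one] at hi
    obtain ⟨h0, h1⟩ := hi
    dsimp only
    rw [show PySem.List.slice w none none = w by simp [pysem]]
    have hlt : i.toNat < w.length := by omega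
    rw [show i = (i.toNat : Int) from (Int.toNat_of_nonneg h0).symm,
        PySem.List.pop?_natCast w i.toNat hlt]
    exact congrArg (max acc) (conf_small _ _ (by omega))
  · rw [if_neg h3]
    try dsimp only
    rw [show PySem.List.slice w none (some N) = w.take N.toNat from
          PySem.List.slice_to w (by omega)]
    rw [base_eq w N (by omega) hPre]
    apply PySem.List.foldl_congr_mem
    intro acc i hi
    rw [PySem.List.mem_pyRange_one] at hi
    obtain ⟨h0, h1⟩ := hi
    try dsimp only
    rw [show PySem.List.slice w none none = w by simp [pysem]]
    have hlt : i.toNat < w.length := by omega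
    have hi' : i = (i.toNat : Int) := (Int.toNat_of_nonneg h0).symm
    rw [hi', PySem.List.pop?_natCast w i.toNat hlt]
    exact congrArg (max acc) (core w N i.toNat (by omega) hPre (by omega))
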